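-- pv_equiv track=rewrite | github.com/shr3yajaisal/CogniRead | QMSum_Gist.py | create_qmsum_gists
-- ===== SOURCE A (Python) =====
-- def create_qmsum_gists(pages):
--     gists = []
--
--     for i, page in enumerate(pages):
--         decisions = []
--         action_items = []
--         key_points = []
--
--         lines = [line.strip() for line in page.split('\n') if line.strip()]
--         for line in lines:
--             lower_line = line.lower()
--
--             if any(phrase in lower_line for phrase in ['agree', 'decide', 'conclude', 'resolution']):
--                 decisions.append(line)
--
--             elif any(phrase in lower_line for phrase in ['action', 'task', 'todo', 'assign']):
--                 action_items.append(line)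
--
--             elif any(phrase in lower_line for phrase in ['important', 'key point', 'note that']):
--                 key_points.append(line)
--
--         gist_parts = []
--         if decisions:
--             gist_parts.append(f"Decisions: {decisions[0]}")
--         if action_items:
--             gist_parts.append(f"Actions: {action_items[0]}")
--         if key_points and not (decisions or action_items):
--             gist_parts.append(f"Key Point: {key_points[0]}")
--
--         gist = " | ".join(gist_parts) if gist_parts else "Meeting discussion"
--         gists.append(f"(Page {i}) {gist}")
--
--     return gists
-- ===== SOURCE B (Python) =====
-- DEC_PHRASES = ('agree', 'decide', 'conclude', 'resolution')
-- ACT_PHRASES = ('action', 'task', 'todo', 'assign')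
-- KEY_PHRASES = ('important', 'key point', 'note that')
--
--
-- def _has(phrases, line):
--     lower_line = line.lower()
--     return any(p in lower_line for p in phrases)
--
--
-- def create_qmsum_gists(pages):
--     gists = []
--     for i, page in enumerate(pages):
--         lines = [line.strip() for line in page.split('\n') if line.strip()]
--         # first line per category, mirroring the if/elif priority (dec > act > key)
--         dec = next((l for l in lines if _has(DEC_PHRASES, l)), None)
--         act = next((l for l in lines if _has(ACT_PHRASES, l) and not _has(DEC_PHRASES, l)), None)
--         key = next((l for l in lines if _has(KEY_PHRASES, l)
--                     and not _has(DEC_PHRASES, l) and not _has(ACT_PHRASES, l)), None)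
--         parts = []
--         if dec is not None:
--             parts.append(f"Decisions: {dec}")
--         if act is not None:
--             parts.append(f"Actions: {act}")
--         if key is not None and dec is None and act is None:
--             parts.append(f"Key Point: {key}")
--         gist = " | ".join(parts) if parts else "Meeting discussion"
--         gists.append(f"(Page {i}) {gist}")
--     return gists
-- ===== Notes on version B (the rewrite author's own statement) =====
-- stated objective: simpler
-- what changed: Replaces the single classifying pass that accumulates three whole lists with three direct first-match searches (next(...) per category) keeping only one line per category, so no lists are built and only the first hits are retained.
import Mathlib
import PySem

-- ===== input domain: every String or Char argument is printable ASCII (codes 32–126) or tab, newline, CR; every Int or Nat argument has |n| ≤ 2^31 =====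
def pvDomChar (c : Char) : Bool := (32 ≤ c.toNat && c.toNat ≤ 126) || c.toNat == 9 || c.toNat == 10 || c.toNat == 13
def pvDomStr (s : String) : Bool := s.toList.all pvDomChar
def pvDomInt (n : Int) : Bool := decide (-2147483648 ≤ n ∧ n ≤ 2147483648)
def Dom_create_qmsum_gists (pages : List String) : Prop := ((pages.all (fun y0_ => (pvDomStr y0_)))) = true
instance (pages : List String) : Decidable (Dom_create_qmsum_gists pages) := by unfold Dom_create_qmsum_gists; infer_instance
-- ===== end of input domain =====

-- B replaces A's single classifying pass accumulating three whole lists by three direct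
-- first-match searches (one find per category); objective: simpler, same asymptotic cost.


-- shared phrase-list constants (the same literals appear in both Pythons)
def pvDecPhrases : List String := ["agree", "decide", "conclude", "resolution"]
def pvActPhrases : List String := ["action", "task", "todo", "assign"]
def pvKeyPhrases : List String := ["important", "key point", "note that"]

-- ===== PORT A =====
-- any(phrase in lower_line for phrase in …)
def pvAnyInA (phrases : List String) (lower_line : String) : Bool :=
  phrases.any (fun phrase => PySem.Str.isIn phrase lower_line)

-- A's per-page body: classify every line into three accumulated lists, then assemble.
-- decisions[0] etc. are guarded by nonemptiness in A, so headD "" is exact there.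
def pvPageA (i : Int) (page : String) : String :=
  let lines := (((PySem.Str.split? page "\n").getD []).map PySem.Str.strip).filter (fun l => !(l == ""))
  let st := lines.foldl (fun (st : List String × List String × List String) line =>
      let lower_line := PySem.Str.lower line
      if pvAnyInA pvDecPhrases lower_line then (st.1 ++ [line], st.2.1, st.2.2)
      else if pvAnyInA pvActPhrases lower_line then (st.1, st.2.1 ++ [line], st.2.2)
      else if pvAnyInA pvKeyPhrases lower_line then (st.1, st.2.1, st.2.2 ++ [line])
      else st) ([], [], [])
  let decisions := st.1
  let action_items := st.2.1
  let key_points := st.2.2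
  let gist_parts : List String :=
    (if decisions.isEmpty then [] else ["Decisions: " ++ decisions.headD ""])
      ++ (if action_items.isEmpty then [] else ["Actions: " ++ action_items.headD ""])
      ++ (if !key_points.isEmpty && !(!decisions.isEmpty || !action_items.isEmpty)
          then ["Key Point: " ++ key_points.headD ""] else [])
  let gist := if gist_parts.isEmpty then "Meeting discussion" else PySem.Str.join " | " gist_parts
  "(Page " ++ PySem.Int.toStr i ++ ") " ++ gist

def create_qmsum_gists (pages : List String) : List String :=
  (PySem.List.enumerate pages 0).foldl (fun gists ip => gists ++ [pvPageA ip.1 ip.2]) []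

-- ===== PORT B =====
def pvHasB (phrases : List String) (line : String) : Bool :=
  let lower_line := PySem.Str.lower line
  phrases.any (fun phrase => PySem.Str.isIn phrase lower_line)

def pvPageB (i : Int) (page : String) : String :=
  let lines := (((PySem.Str.split? page "\n").getD []).map PySem.Str.strip).filter (fun l => !(l == ""))
  let dec := lines.find? (fun l => pvHasB pvDecPhrases l)
  let act := lines.find? (fun l => pvHasB pvActPhrases l && !pvHasB pvDecPhrases l)
  let key := lines.find? (fun l =>
    pvHasB pvKeyPhrases l && !pvHasB pvDecPhrases l && !pvHasB pvActPhrases l)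
  let parts : List String :=
    (match dec with | some d => ["Decisions: " ++ d] | none => [])
      ++ (match act with | some a => ["Actions: " ++ a] | none => [])
      ++ (match key, dec, act with
          | some k, none, none => ["Key Point: " ++ k]
          | _, _, _ => [])
  let gist := if parts.isEmpty then "Meeting discussion" else PySem.Str.join " | " parts
  "(Page " ++ PySem.Int.toStr i ++ ") " ++ gist

def create_qmsum_gists_alt (pages : List String) : List String :=
  (PySem.List.enumerate pages 0).map (fun ip => pvPageB ip.1 ip.2)

-- ===== PRECONDITION & SPEC =====
def Spec_create_qmsum_gists (pages : List String) (out : List String) : Prop := out = create_qmsum_gists_alt pages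
instance (pages : List String) (out : List String) : Decidable (Spec_create_qmsum_gists pages out) := by unfold Spec_create_qmsum_gists; infer_instance

-- ===== CLAIM (what is proved, stated in full; the proofs are below) =====
def Claim_equal_create_qmsum_gists : Prop := ∀ (pages : List String), Dom_create_qmsum_gists pages → Spec_create_qmsum_gists pages (create_qmsum_gists pages)

-- ===== LEMMAS AND PROOFS =====

-- A's classifying fold produces the three filtered sublists (stated with B's predicates).
theorem pvFoldA_eq (lines : List String) (d a k : List String) :
    lines.foldl (fun (st : List String × List String × List String) line =>
      let lower_line := PySem.Str.lower line
      if pvAnyInA pvDecPhrases lower_line then (st.1 ++ [line], st.2.1, st.2.2)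
      else if pvAnyInA pvActPhrases lower_line then (st.1, st.2.1 ++ [line], st.2.2)
      else if pvAnyInA pvKeyPhrases lower_line then (st.1, st.2.1, st.2.2 ++ [line])
      else st) (d, a, k)
    = (d ++ lines.filter (fun l => pvHasB pvDecPhrases l),
       a ++ lines.filter (fun l => pvHasB pvActPhrases l && !pvHasB pvDecPhrases l),
       k ++ lines.filter (fun l =>
         pvHasB pvKeyPhrases l && !pvHasB pvDecPhrases l && !pvHasB pvActPhrases l)) := by
  induction lines generalizing d a k with
  | nil => simp
  | cons x xs ih =>
    have hDec : pvAnyInA pvDecPhrases (PySem.Str.lower x) = pvHasB pvDecPhrases x := rfl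
    have hAct : pvAnyInA pvActPhrases (PySem.Str.lower x) = pvHasB pvActPhrases x := rfl
    have hKey : pvAnyInA pvKeyPhrases (PySem.Str.lower x) = pvHasB pvKeyPhrases x := rfl
    simp only [List.foldl_cons, List.filter_cons, hDec, hAct, hKey]
    by_cases h1 : pvHasB pvDecPhrases x <;>
      by_cases h2 : pvHasB pvActPhrases x <;>
        by_cases h3 : pvHasB pvKeyPhrases x <;>
          simp [h1, h2, h3, ih]

-- A's and B's assembly steps agree, given the three filtered sublists / their heads.
theorem pvAssemble_eq (F1 F2 F3 : List String) :
    (let gist_parts : List String :=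
      (if F1.isEmpty then [] else ["Decisions: " ++ F1.headD ""])
        ++ (if F2.isEmpty then [] else ["Actions: " ++ F2.headD ""])
        ++ (if !F3.isEmpty && !(!F1.isEmpty || !F2.isEmpty)
            then ["Key Point: " ++ F3.headD ""] else []);
     if gist_parts.isEmpty then "Meeting discussion" else PySem.Str.join " | " gist_parts)
    = (let parts : List String :=
        (match F1.head? with | some d => ["Decisions: " ++ d] | none => [])
          ++ (match F2.head? with | some a => ["Actions: " ++ a] | none => [])
          ++ (match F3.head?, F1.head?, F2.head? with
              | some k, none, none => ["Key Point: " ++ k]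
              | _, _, _ => []);
       if parts.isEmpty then "Meeting discussion" else PySem.Str.join " | " parts) := by
  cases F1 <;> cases F2 <;> cases F3 <;> simp

theorem pvPage_eq (i : Int) (page : String) : pvPageA i page = pvPageB i page := by
  simp only [pvPageA, pvPageB, pvFoldA_eq, List.nil_append, ← List.head?_filter]
  exact congrArg (fun g => "(Page " ++ PySem.Int.toStr i ++ ") " ++ g) (pvAssemble_eq _ _ _)

-- ===== VERDICT (by name: the statement is the Claim_ definition above) =====
theorem create_qmsum_gists_spec : Claim_equal_create_qmsum_gists := by
  intro pages _
  unfold Spec_create_qmsum_gists create_qmsum_gists create_qmsum_gists_alt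
  rw [PySem.List.foldl_append_singleton_eq_map]
  simp [pvPage_eq]
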